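-- pv_equiv track=rewrite | github.com/Mancupfire/Retrieval_Model | Retrieval_Model.py | extract_users
-- ===== SOURCE A (Python) =====
-- def extract_users(info):
--     '''
--     input:
--         info: data['np2users']
--     output:
--         list_user, user2kw
--     '''
--     l_user, user2kw = [], []
--     for ii in info:
--         lus = info[ii]
--         for u in lus:
--             if u not in l_user:
--                 l_user.append(u)
--                 user2kw.append([])
--             idx = l_user.index(u)
--             user2kw[idx].append(ii)
--     return l_user, user2kw
-- ===== SOURCE B (Python) =====
-- def extract_users(info):
--     # staged passes: flatten to (user, keyword) pairs, dedupe users, then filter per user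
--     pairs = [(u, ii) for ii, lus in info.items() for u in lus]
--     l_user = list(dict.fromkeys(u for u, _ in pairs))
--     return l_user, [[ii for u2, ii in pairs if u2 == u] for u in l_user]
-- ===== Notes on version B (the rewrite author's own statement) =====
-- stated objective: alternative
-- what changed: Replaces A's single nested loop maintaining parallel lists (membership guard + list.index per keyword) by three staged passes with no mutable accumulator: flatten the dict to an ordered (user, keyword) pair list, dedupe the user column with dict.fromkeys, then build each user's keyword list by filtering the pairs.
import Mathlib
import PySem

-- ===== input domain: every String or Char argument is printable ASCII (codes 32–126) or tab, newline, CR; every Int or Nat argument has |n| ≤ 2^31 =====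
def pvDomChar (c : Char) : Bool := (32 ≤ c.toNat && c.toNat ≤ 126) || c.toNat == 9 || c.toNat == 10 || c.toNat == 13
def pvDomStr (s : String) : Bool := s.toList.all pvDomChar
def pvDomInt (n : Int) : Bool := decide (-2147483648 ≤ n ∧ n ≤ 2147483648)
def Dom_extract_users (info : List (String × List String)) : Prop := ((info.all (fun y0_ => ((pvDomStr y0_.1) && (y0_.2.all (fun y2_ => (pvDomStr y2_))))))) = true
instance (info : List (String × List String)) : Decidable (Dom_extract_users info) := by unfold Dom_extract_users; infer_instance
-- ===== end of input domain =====

-- B replaces A's single nested loop over parallel lists by three staged passes: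
-- flatten to (user, keyword) pairs, dedupe the user column, filter keywords per user.
-- The dict parameter `info` is modelled by PySem.Dict.ofList (Python dict semantics).

-- ===== PORT A =====
-- inner loop body: `if u not in l_user: …; idx = l_user.index(u); user2kw[idx].append(ii)`
def pvAStep (ii : String) (s : List String × List (List String)) (u : String) :
    List String × List (List String) :=
  let s := if u ∈ s.1 then s else (s.1 ++ [u], s.2 ++ [[]])
  match PySem.List.index? s.1 u with
  | some i => (s.1, s.2.modify i (· ++ [ii]))
  | none => s  -- unreachable: u was just appended if absent

def extract_users (info : List (String × List String)) : List String × List (List String) :=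
  let d := PySem.Dict.ofList info
  d.items.foldl (fun s p => p.2.foldl (pvAStep p.1) s) ([], [])

-- ===== PORT B =====
-- pairs = [(u, ii) for ii, lus in info.items() for u in lus]
-- l_user = list(dict.fromkeys(u for u, _ in pairs))  — PySem.List.dedup
-- return l_user, [[ii for u2, ii in pairs if u2 == u] for u in l_user]
def extract_users_alt (info : List (String × List String)) : List String × List (List String) :=
  let pairs := (PySem.Dict.ofList info).items.flatMap (fun p => p.2.map (fun u => (u, p.1)))
  let l_user := PySem.List.dedup (pairs.map Prod.fst)
  (l_user, l_user.map (fun u => (pairs.filter (fun q => q.1 == u)).map Prod.snd))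

-- ===== PRECONDITION & SPEC =====
def Spec_extract_users (info : List (String × List String)) (out : List String × List (List String)) : Prop := out = extract_users_alt info
instance (info : List (String × List String)) (out : List String × List (List String)) : Decidable (Spec_extract_users info out) := by unfold Spec_extract_users; infer_instance

-- ===== CLAIM (what is proved, stated in full; the proofs are below) =====
def Claim_equal_extract_users : Prop := ∀ (info : List (String × List String)), Dom_extract_users info → Spec_extract_users info (extract_users info)

-- ===== LEMMAS AND PROOFS =====

-- B's result as a function of the flattened pair list
def pvF (pairs : List (String × String)) : List String × List (List String) :=
  let l_user := PySem.List.dedup (pairs.map Prod.fst)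
  (l_user, l_user.map (fun u => (pairs.filter (fun q => q.1 == u)).map Prod.snd))

-- A's nested fold = a single fold over the flattened pairs
lemma pv_fold_pairs (L : List (String × List String)) :
    ∀ (s : List String × List (List String)),
      L.foldl (fun s p => p.2.foldl (pvAStep p.1) s) s
        = (L.flatMap (fun p => p.2.map (fun u => (u, p.1)))).foldl
            (fun s q => pvAStep q.2 s q.1) s := by
  induction L with
  | nil => intro s; rfl
  | cons p rest ih =>
      intro s
      simp only [List.foldl_cons, List.flatMap_cons, List.foldl_append, List.foldl_map]
      exact ih _

lemma pv_modify_last {α : Type} (k : List α) (x : α) (f : α → α) :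
    (k ++ [x]).modify k.length f = k ++ [f x] := by
  apply List.ext_getElem
  · simp
  · intro j h1 h2
    rw [List.getElem_modify]
    by_cases hj : j = k.length
    · subst hj; simp
    · have hjk : j < k.length := by simp [List.length_modify] at h1; omega
      rw [if_neg (by omega), List.getElem_append_left hjk, List.getElem_append_left hjk]

-- modifying a map over a nodup list at the first index of u = mapping the updated function
lemma pv_modify_map {β : Type} (l : List String) (g : String → β) (u : String) (f : β → β)
    (hnd : l.Nodup) (i : ℕ) (hi : PySem.List.index? l u = some i) :
    (l.map g).modify i f = l.map (fun x => if x = u then f (g x) else g x) := by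
  obtain ⟨hik, hli, _⟩ := PySem.List.getElem_of_index?_eq_some hi
  apply List.ext_getElem
  · simp [List.length_modify]
  · intro j hj1 hj2
    have hjl : j < l.length := by simp [List.length_modify] at hj1; omega
    rw [List.getElem_modify]
    simp only [List.getElem_map]
    by_cases hju : l[j] = u
    · have hji : j = i := (hnd.getElem_inj_iff (hi := hjl) (hj := hik)).1 (by rw [hju, hli])
      subst hji
      simp [hju]
    · have : i ≠ j := fun hc => hju (hc ▸ hli)
      simp [hju, this]

-- one step of A's loop advances pvF by one pair
lemma pv_step (pairs : List (String × String)) (u ii : String) :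
    pvAStep ii (pvF pairs) u = pvF (pairs ++ [(u, ii)]) := by
  set l1 := PySem.List.dedup (pairs.map Prod.fst) with hl1
  have hnd : l1.Nodup := PySem.List.nodup_dedup _
  have hmem : ∀ x, x ∈ l1 ↔ x ∈ pairs.map Prod.fst := fun x => PySem.List.mem_dedup _ x
  have hfilter : ∀ u', ((pairs ++ [(u, ii)]).filter (fun q => q.1 == u')).map Prod.snd
      = ((pairs.filter (fun q => q.1 == u')).map Prod.snd) ++ (if u = u' then [ii] else []) := by
    intro u'
    rw [List.filter_append]
    by_cases h : u = u' <;> simp [h]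
  have hdedup : PySem.List.dedup ((pairs ++ [(u, ii)]).map Prod.fst)
      = if u ∈ l1 then l1 else l1 ++ [u] := by
    rw [List.map_append]
    simp only [List.map_cons, List.map_nil]
    rw [PySem.List.dedup_eq_ofList, PySem.Set.ofList_eq_foldl, List.foldl_append,
      List.foldl_cons, List.foldl_nil, ← PySem.Set.ofList_eq_foldl, ← PySem.List.dedup_eq_ofList]
    by_cases h : u ∈ l1 <;>
      simp [PySem.Set.add, PySem.Set.contains, ← PySem.List.dedup_eq_ofList, ← hl1, h]
  set g : String → List String := fun u' => (pairs.filter (fun q => q.1 == u')).map Prod.snd with hg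
  by_cases hu : u ∈ l1
  · -- existing user
    obtain ⟨i, hi⟩ := Option.isSome_iff_exists.1 ((PySem.List.index?_isSome_iff l1 u).2 hu)
    obtain ⟨hik, hli, _⟩ := PySem.List.getElem_of_index?_eq_some hi
    unfold pvAStep pvF
    simp only [← hl1, ← hg, hu, if_pos, hi]
    rw [hdedup, if_pos hu]
    refine Prod.ext rfl ?_
    show (l1.map g).modify i (· ++ [ii]) = l1.map _
    rw [pv_modify_map l1 g u (· ++ [ii]) hnd i hi]
    apply List.map_congr_left
    intro x _
    rw [hfilter x]
    by_cases hx : x = u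
    · subst hx; simp [hg]
    · simp [hx, Ne.symm hx, hg]
  · -- new user
    have hidx := PySem.List.index?_append_singleton_self l1 u hu
    unfold pvAStep pvF
    simp only [← hl1, ← hg, hu, if_false, hidx]
    rw [hdedup, if_neg hu]
    refine Prod.ext rfl ?_
    show ((l1.map g) ++ [[]]).modify l1.length (· ++ [ii]) = (l1 ++ [u]).map _
    have hlen : (l1.map g).length = l1.length := List.length_map ..
    rw [← hlen, pv_modify_last, List.map_append]
    congr 1
    · apply List.map_congr_left
      intro x hx
      rw [hfilter x]
      have hxu : ¬ (u = x) := fun h => hu (h ▸ hx)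
      simp [hxu, hg]
    · have hgu : g u = [] := by
        have hnil : pairs.filter (fun q => q.1 == u) = [] := List.filter_eq_nil_iff.2 (by
          intro q hq hc
          exact hu ((hmem u).2 (List.mem_map.2 ⟨q, hq, by simpa using hc⟩)))
        simp [hg, hnil]
      simp
      intro a b hab h
      exact hu ((hmem u).2 (List.mem_map.2 ⟨(a, b), hab, h⟩))

lemma pv_main (pairs : List (String × String)) :
    pairs.foldl (fun s q => pvAStep q.2 s q.1) ([], []) = pvF pairs := by
  induction pairs using List.reverseRecOn with
  | nil => rfl
  | append_singleton l q ih =>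
      rw [List.foldl_append, List.foldl_cons, List.foldl_nil, ih, pv_step]

-- ===== VERDICT (by name: the statement is the Claim_ definition above) =====
theorem extract_users_spec : Claim_equal_extract_users := by
  intro info _
  unfold Spec_extract_users extract_users extract_users_alt
  rw [pv_fold_pairs, pv_main]
  rfl
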